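-- pv_equiv track=rewrite | github.com/Pragna235/Google_Interview_Sheet | Toggle Challenge.py | parse_segment_matrix
-- ===== SOURCE A (Python) =====
-- def parse_segment_matrix(lines):
--     num_digits = len(lines[0]) // 3
--     digits = []
--     for i in range(num_digits):
--         start = i * 3
--         end = start + 3
--         block = [line[start:end] for line in lines]
--         digits.append(block)
--     return digits
-- ===== SOURCE B (Python) =====
-- def parse_segment_matrix(lines):
--     num_digits = len(lines[0]) // 3
--     chunked = [[line[3 * i:3 * i + 3] for i in range(num_digits)] for line in lines]
--     return [list(col) for col in zip(*chunked)]
-- ===== Notes on version B (the rewrite author's own statement) =====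
-- stated objective: alternative
-- what changed: B chunks each line once into its 3-char blocks (row-major) and then regroups by digit with a single transpose (zip(*chunked)), instead of A's per-digit outer loop that re-slices every line for each digit.
import Mathlib
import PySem

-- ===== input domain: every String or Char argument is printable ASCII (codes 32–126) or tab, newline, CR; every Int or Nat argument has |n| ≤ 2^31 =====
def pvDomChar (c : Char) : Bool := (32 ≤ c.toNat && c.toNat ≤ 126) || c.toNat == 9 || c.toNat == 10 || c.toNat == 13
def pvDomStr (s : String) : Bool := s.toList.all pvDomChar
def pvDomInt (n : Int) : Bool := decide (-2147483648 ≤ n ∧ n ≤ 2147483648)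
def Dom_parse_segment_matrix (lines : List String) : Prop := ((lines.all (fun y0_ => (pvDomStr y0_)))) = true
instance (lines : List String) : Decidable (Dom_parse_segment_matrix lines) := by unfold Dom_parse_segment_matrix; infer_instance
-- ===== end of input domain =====

-- B chunks each line once into its 3-char blocks and regroups by digit with one transpose (zip(*chunked)), instead of A's per-digit outer loop re-slicing every line.

-- ===== PORT A =====
-- A: num_digits = len(lines[0]) // 3; for each i, slice every line; append the block.
def parse_segment_matrix (lines : List String) : List (List String) :=
  let num_digits : Int := PySem.Int.floordiv (PySem.Str.len (lines.headD "")) 3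
  (PySem.List.pyRange 0 num_digits 1).foldl
    (fun digits i =>
      let start := i * 3
      let stop := start + 3
      digits ++ [lines.map (fun line => PySem.Str.slice line (some start) (some stop))])
    []

-- ===== PORT B =====
-- Python's zip(*rows): take heads while every row is nonempty, tuples become lists.
def pvZipStar (rows : List (List String)) : List (List String) :=
  if h : rows ≠ [] ∧ rows.all (fun r => !r.isEmpty) then
    (rows.map (fun r => r.headD "")) :: pvZipStar (rows.map List.tail)
  else []
termination_by (rows.headD []).length
decreasing_by
  obtain ⟨hne, hall⟩ := h
  cases rows with
  | nil => exact absurd rfl hne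
  | cons r rs =>
    simp only [List.all_cons, Bool.and_eq_true, Bool.not_eq_true', List.isEmpty_eq_false_iff] at hall
    simp only [List.headD_cons]
    cases r with
    | nil => exact absurd rfl hall.1
    | cons c cs => simp

def parse_segment_matrix_alt (lines : List String) : List (List String) :=
  let num_digits : Int := PySem.Int.floordiv (PySem.Str.len (lines.headD "")) 3
  let chunked := lines.map (fun line =>
    (PySem.List.pyRange 0 num_digits 1).map (fun i =>
      PySem.Str.slice line (some (3 * i)) (some (3 * i + 3))))
  pvZipStar chunked

-- ===== PRECONDITION & SPEC =====
-- Pre_ excludes only the empty list, on which A raises IndexError at lines[0].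
def Pre_parse_segment_matrix (lines : List String) : Prop := lines ≠ []
instance (lines : List String) : Decidable (Pre_parse_segment_matrix lines) := by unfold Pre_parse_segment_matrix; infer_instance
def pvWitness_parse_segment_matrix : List String := [" _ |_||_|", "|_| _| _|"]

def Spec_parse_segment_matrix (lines : List String) (out : List (List String)) : Prop := out = parse_segment_matrix_alt lines
instance (lines : List String) (out : List (List String)) : Decidable (Spec_parse_segment_matrix lines out) := by unfold Spec_parse_segment_matrix; infer_instance

-- ===== CLAIM (what is proved, stated in full; the proofs are below) =====
def Claim_equal_parse_segment_matrix : Prop := ∀ (lines : List String), Dom_parse_segment_matrix lines → Pre_parse_segment_matrix lines → Spec_parse_segment_matrix lines (parse_segment_matrix lines)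

-- ===== LEMMAS AND PROOFS =====

-- A's append-fold over a range is map.
theorem foldl_append_singleton_map {α β : Type} (r : List α) (f : α → β) (acc : List β) :
    r.foldl (fun digits i => digits ++ [f i]) acc = acc ++ r.map f := by
  induction r generalizing acc with
  | nil => simp
  | cons i r ih => simp [List.foldl_cons, ih]

-- Transposing a rectangular table whose rows are r.map (g l): zip(*·) regroups by column.
theorem pvZipStar_map {r : List Int} {lines : List String} (hne : lines ≠ [])
    (g : String → Int → String) :
    pvZipStar (lines.map (fun l => r.map (g l))) = r.map (fun i => lines.map (fun l => g l i)) := by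
  induction r with
  | nil =>
    rw [pvZipStar]
    simp only [List.map_nil]
    rw [dif_neg]
    intro ⟨_, hall⟩
    cases lines with
    | nil => exact absurd rfl hne
    | cons l ls => simp at hall
  | cons i r ih =>
    rw [pvZipStar]
    rw [dif_pos]
    · have h1 : ((lines.map (fun l => (i :: r).map (g l))).map (fun row => row.headD ""))
          = lines.map (fun l => g l i) := by simp
      have h2 : ((lines.map (fun l => (i :: r).map (g l))).map List.tail)
          = lines.map (fun l => r.map (g l)) := by simp
      rw [h1, h2, ih, List.map_cons]
    · constructor
      · simpa using hne
      · simp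

theorem parse_segment_matrix_eq_alt (lines : List String) (hne : lines ≠ []) :
    parse_segment_matrix lines = parse_segment_matrix_alt lines := by
  unfold parse_segment_matrix parse_segment_matrix_alt
  rw [foldl_append_singleton_map, List.nil_append,
    pvZipStar_map hne (fun line i => PySem.Str.slice line (some (3 * i)) (some (3 * i + 3)))]
  apply List.map_congr_left
  intro i _
  apply List.map_congr_left
  intro l _
  rw [Int.mul_comm]

-- ===== VERDICT (by name: the statement is the Claim_ definition above) =====
theorem parse_segment_matrix_spec : Claim_equal_parse_segment_matrix := by
  intro lines _ hpre
  unfold Spec_parse_segment_matrix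
  exact parse_segment_matrix_eq_alt lines hpre
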